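-- pv_equiv track=rewrite | github.com/saifk1raiem/Projet-pfe | backend/app/api/v1/qualification_preview.py | _merge_supplemental_group
-- ===== SOURCE A (Python) =====
-- SUPPLEMENTAL_QUALIFICATION_FIELDS = (
--     "matricule",
--     "nom",
--     "prenom",
--     "fonction",
--     "centre_cout",
--     "groupe",
--     "motif",
--     "contre_maitre",
--     "segment",
--     "num_tel",
--     "date_recrutement",
--     "anciennete",
-- )
--
-- SUPPLEMENTAL_CONFLICT_FIELDS = (
--     "num_tel",
--     "centre_cout",
--     "groupe",
--     "contre_maitre",
--     "segment",
--     "fonction",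
--     "date_recrutement",
--     "anciennete",
-- )
--
-- def _is_blank_preview_value(value) -> bool:
--     if value is None:
--         return True
--     if isinstance(value, str):
--         return not value.strip()
--     return False
--
-- def _preview_value_token(value) -> str | None:
--     if _is_blank_preview_value(value):
--         return None
--     if isinstance(value, str):
--         return " ".join(value.split()).strip().casefold() or None
--     return str(value)
--
-- def _distinct_preview_values(rows: list[dict], field: str) -> list:
--     distinct_values = []
--     seen_tokens: set[str] = set()
--     for row in rows:
--         token = _preview_value_token(row.get(field))
--         if token is None or token in seen_tokens:
--             continue
--         seen_tokens.add(token)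
--         distinct_values.append(row.get(field))
--     return distinct_values
--
-- def _last_non_blank_preview_value(rows: list[dict], field: str):
--     for row in reversed(rows):
--         value = row.get(field)
--         if _preview_value_token(value) is not None:
--             return value
--     return None
--
-- def _merge_supplemental_group(rows: list[dict]) -> tuple[dict | None, list[str]]:
--     if not rows:
--         return None, []
--
--     merged = dict(rows[0])
--     conflict_fields: list[str] = []
--     for field in SUPPLEMENTAL_QUALIFICATION_FIELDS:
--         distinct_values = _distinct_preview_values(rows, field)
--         if not distinct_values:
--             merged[field] = None
--             continue
--
--         if field == "motif":
--             merged[field] = _last_non_blank_preview_value(rows, field)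
--             continue
--
--         if field in SUPPLEMENTAL_CONFLICT_FIELDS and len(distinct_values) > 1:
--             merged[field] = None
--             conflict_fields.append(field)
--             continue
--
--         merged[field] = distinct_values[0]
--
--     return merged, conflict_fields
-- ===== SOURCE B (Python) =====
-- SUPPLEMENTAL_QUALIFICATION_FIELDS = (
--     "matricule",
--     "nom",
--     "prenom",
--     "fonction",
--     "centre_cout",
--     "groupe",
--     "motif",
--     "contre_maitre",
--     "segment",
--     "num_tel",
--     "date_recrutement",
--     "anciennete",
-- )
--
-- SUPPLEMENTAL_CONFLICT_FIELDS = (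
--     "num_tel",
--     "centre_cout",
--     "groupe",
--     "contre_maitre",
--     "segment",
--     "fonction",
--     "date_recrutement",
--     "anciennete",
-- )
--
--
-- def _norm_token(value):
--     if value is None:
--         return None
--     if isinstance(value, str):
--         if not value.strip():
--             return None
--         return " ".join(value.split()).strip().casefold() or None
--     return str(value)
--
--
-- def _step(value, agg):
--     # agg = (seen tokens, first distinct value, distinct count, last non-blank value)
--     seen, first, count, last = agg
--     token = _norm_token(value)
--     if token is None:
--         return agg
--     if token in seen:
--         return seen, first, count, value
--     return seen | {token}, first if count else value, count + 1, value
--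
--
-- def _merge_supplemental_group(rows):
--     if not rows:
--         return None, []
--
--     state = {f: (frozenset(), None, 0, None) for f in SUPPLEMENTAL_QUALIFICATION_FIELDS}
--     for row in rows:
--         state = {f: _step(row.get(f), agg) for f, agg in state.items()}
--
--     merged = dict(rows[0])
--     conflict_fields = []
--     for field, (seen, first, count, last) in state.items():
--         if count == 0:
--             merged[field] = None
--         elif field == "motif":
--             merged[field] = last
--         elif field in SUPPLEMENTAL_CONFLICT_FIELDS and count > 1:
--             merged[field] = None
--             conflict_fields.append(field)
--         else:
--             merged[field] = first
--     return merged, conflict_fields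
-- ===== Notes on version B (the rewrite author's own statement) =====
-- stated objective: alternative
-- what changed: A scans the rows field-major (for each of the 12 fields it rebuilds a distinct-value list over all rows, plus an extra reversed scan for 'motif'); B makes a single row-major pass accumulating per-field (seen tokens, first distinct value, distinct count, last non-blank value) and then resolves each field from those aggregates in one pass over the field tuple.
import Mathlib
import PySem

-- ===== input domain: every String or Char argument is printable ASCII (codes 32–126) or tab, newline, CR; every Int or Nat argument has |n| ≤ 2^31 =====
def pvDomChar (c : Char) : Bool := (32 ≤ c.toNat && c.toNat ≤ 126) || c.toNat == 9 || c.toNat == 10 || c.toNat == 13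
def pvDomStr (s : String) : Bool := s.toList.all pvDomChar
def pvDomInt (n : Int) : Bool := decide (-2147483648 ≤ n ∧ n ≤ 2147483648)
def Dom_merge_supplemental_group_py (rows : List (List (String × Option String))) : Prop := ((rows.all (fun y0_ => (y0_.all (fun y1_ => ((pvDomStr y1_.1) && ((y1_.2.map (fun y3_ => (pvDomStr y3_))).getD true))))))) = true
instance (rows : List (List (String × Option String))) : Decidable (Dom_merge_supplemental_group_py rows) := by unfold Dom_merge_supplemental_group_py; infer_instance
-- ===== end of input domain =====

-- B replaces A's field-major passes (per field: one scan building a distinct-value list plus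
-- an extra reversed scan for "motif") by a single row-major pass accumulating, per field,
-- (seen tokens, first distinct value, distinct count, last non-blank value), then one
-- resolution pass over the fixed field tuple; objective: alternative decomposition.

-- shared helpers: transliterations of the module's _is_blank_preview_value / _preview_value_token
-- (values are Optional[str]; casefold = lower on the ASCII domain)
def pvIsBlank (v : Option String) : Bool :=
  match v with
  | none => true
  | some s => PySem.Str.strip s == ""

def pvToken (v : Option String) : Option String :=
  if pvIsBlank v then none
  else
    match v with
    | some s =>
        let t := PySem.Str.lower (PySem.Str.strip (PySem.Str.join " " (PySem.Str.split₀ s)))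
        if t == "" then none else some t
    | none => none

-- row.get(field)  (default None)
def pvRowGet (row : List (String × Option String)) (f : String) : Option String :=
  (PySem.Dict.mk row).getD f none

def pvFields : List String :=
  ["matricule", "nom", "prenom", "fonction", "centre_cout", "groupe", "motif",
   "contre_maitre", "segment", "num_tel", "date_recrutement", "anciennete"]

def pvConflictFields : List String :=
  ["num_tel", "centre_cout", "groupe", "contre_maitre", "segment", "fonction",
   "date_recrutement", "anciennete"]

-- ===== PORT A =====
def pvDistinctStep (f : String) (st : PySem.Set String × List (Option String))
    (row : List (String × Option String)) : PySem.Set String × List (Option String) :=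
  match pvToken (pvRowGet row f) with
  | none => st
  | some t => if PySem.Set.contains st.1 t then st else (PySem.Set.add st.1 t, st.2 ++ [pvRowGet row f])

def pvDistinct (rows : List (List (String × Option String))) (f : String) : List (Option String) :=
  (rows.foldl (pvDistinctStep f) (PySem.Set.empty, [])).2

def pvLastAux (f : String) : List (List (String × Option String)) → Option String
  | [] => none
  | r :: rest =>
      match pvToken (pvRowGet r f) with
      | some _ => pvRowGet r f
      | none => pvLastAux f rest

def pvLastNonBlank (rows : List (List (String × Option String))) (f : String) : Option String :=
  pvLastAux f rows.reverse

def merge_supplemental_group_py (rows : List (List (String × Option String))) :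
    (Option (List (String × Option String))) × List String :=
  match rows with
  | [] => (none, [])
  | r0 :: _ =>
    let res := pvFields.foldl
      (fun (st : PySem.Dict String (Option String) × List String) f =>
        let dvs := pvDistinct rows f
        if dvs.isEmpty then (st.1.insert f none, st.2)
        else if f == "motif" then (st.1.insert f (pvLastNonBlank rows f), st.2)
        else if pvConflictFields.contains f && decide (1 < dvs.length) then
          (st.1.insert f none, st.2 ++ [f])
        else (st.1.insert f (dvs.headD none), st.2))
      (PySem.Dict.ofList r0, [])
    (some res.1.items, res.2)

-- ===== PORT B =====
def pvStep (v : Option String) (agg : PySem.Set String × Option String × Nat × Option String) :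
    PySem.Set String × Option String × Nat × Option String :=
  match pvToken v with
  | none => agg
  | some t =>
    match agg with
    | (seen, first, count, _last) =>
      if PySem.Set.contains seen t then (seen, first, count, v)
      else (PySem.Set.add seen t, if count == 0 then v else first, count + 1, v)

def pvInitAgg : PySem.Set String × Option String × Nat × Option String :=
  (PySem.Set.empty, none, 0, none)

def pvResolve (st : PySem.Dict String (Option String) × List String)
    (p : String × (PySem.Set String × Option String × Nat × Option String)) :
    PySem.Dict String (Option String) × List String :=
  match p with
  | (f, (_seen, first, count, last)) =>
    if count == 0 then (st.1.insert f none, st.2)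
    else if f == "motif" then (st.1.insert f last, st.2)
    else if pvConflictFields.contains f && decide (1 < count) then (st.1.insert f none, st.2 ++ [f])
    else (st.1.insert f first, st.2)

def merge_supplemental_group_py_alt (rows : List (List (String × Option String))) :
    (Option (List (String × Option String))) × List String :=
  match rows with
  | [] => (none, [])
  | r0 :: _ =>
    let state := rows.foldl
      (fun st row => st.map (fun p => (p.1, pvStep (pvRowGet row p.1) p.2)))
      (pvFields.map (fun f => (f, pvInitAgg)))
    let res := state.foldl pvResolve (PySem.Dict.ofList r0, [])
    (some res.1.items, res.2)

-- ===== PRECONDITION & SPEC =====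
def Spec_merge_supplemental_group_py (rows : List (List (String × Option String))) (out : (Option (List (String × Option String))) × List String) : Prop := out = merge_supplemental_group_py_alt rows
instance (rows : List (List (String × Option String))) (out : (Option (List (String × Option String))) × List String) : Decidable (Spec_merge_supplemental_group_py rows out) := by unfold Spec_merge_supplemental_group_py; infer_instance

-- ===== CLAIM (what is proved, stated in full; the proofs are below) =====
def Claim_equal_merge_supplemental_group_py : Prop := ∀ (rows : List (List (String × Option String))), Dom_merge_supplemental_group_py rows → Spec_merge_supplemental_group_py rows (merge_supplemental_group_py rows)

-- ===== LEMMAS AND PROOFS =====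

-- B's per-field fold, field-major view of the row-major pass
def pvAggFold (rows : List (List (String × Option String))) (f : String) :
    PySem.Set String × Option String × Nat × Option String :=
  rows.foldl (fun a row => pvStep (pvRowGet row f) a) pvInitAgg

theorem pvToken_none : pvToken none = none := rfl

theorem pvToken_isSome_ne_none {v : Option String} {t : String} (h : pvToken v = some t) :
    ∃ s, v = some s := by
  cases v with
  | none => simp [pvToken_none] at h
  | some s => exact ⟨s, rfl⟩

-- equation lemmas for the two step functions
theorem pvStep_tok_none {v : Option String}
    (agg : PySem.Set String × Option String × Nat × Option String)
    (h : pvToken v = none) : pvStep v agg = agg := by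
  simp [pvStep, h]

theorem pvStep_tok_mem {v : Option String} {t : String}
    (seen : PySem.Set String) (first : Option String) (count : Nat) (last : Option String)
    (h : pvToken v = some t) (hm : PySem.Set.contains seen t = true) :
    pvStep v (seen, first, count, last) = (seen, first, count, v) := by
  have hm' : t ∈ seen := (PySem.Set.contains_iff _ _).mp hm
  simp [pvStep, h, hm']

theorem pvStep_tok_new {v : Option String} {t : String}
    (seen : PySem.Set String) (first : Option String) (count : Nat) (last : Option String)
    (h : pvToken v = some t) (hm : PySem.Set.contains seen t = false) :
    pvStep v (seen, first, count, last)
      = (PySem.Set.add seen t, if count == 0 then v else first, count + 1, v) := by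
  have hm' : t ∉ seen := by simpa using hm
  simp [pvStep, h, hm']

theorem pvDistinctStep_tok_none {f : String} {row : List (String × Option String)}
    (st : PySem.Set String × List (Option String))
    (h : pvToken (pvRowGet row f) = none) : pvDistinctStep f st row = st := by
  simp [pvDistinctStep, h]

theorem pvDistinctStep_tok_mem {f : String} {row : List (String × Option String)} {t : String}
    (st : PySem.Set String × List (Option String))
    (h : pvToken (pvRowGet row f) = some t) (hm : PySem.Set.contains st.1 t = true) :
    pvDistinctStep f st row = st := by
  have hm' : t ∈ st.1 := (PySem.Set.contains_iff _ _).mp hm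
  simp [pvDistinctStep, h, hm']

theorem pvDistinctStep_tok_new {f : String} {row : List (String × Option String)} {t : String}
    (st : PySem.Set String × List (Option String))
    (h : pvToken (pvRowGet row f) = some t) (hm : PySem.Set.contains st.1 t = false) :
    pvDistinctStep f st row = (PySem.Set.add st.1 t, st.2 ++ [pvRowGet row f]) := by
  have hm' : t ∉ st.1 := by simpa using hm
  simp [pvDistinctStep, h, hm']

-- L1: the row-major fold acting pointwise on an association list is the map of per-field folds
theorem pv_foldl_map (rows : List (List (String × Option String)))
    (init : List (String × (PySem.Set String × Option String × Nat × Option String))) :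
    rows.foldl (fun st row => st.map (fun p => (p.1, pvStep (pvRowGet row p.1) p.2))) init
      = init.map (fun p => (p.1, rows.foldl (fun a row => pvStep (pvRowGet row p.1) a) p.2)) := by
  induction rows generalizing init with
  | nil => simp
  | cons r rest ih =>
      simp only [List.foldl_cons, ih, List.map_map]
      rfl

theorem pvLastAux_append (f : String) (xs ys : List (List (String × Option String))) :
    pvLastAux f (xs ++ ys) = (pvLastAux f xs).or (pvLastAux f ys) := by
  induction xs with
  | nil => simp [pvLastAux]
  | cons x xs ih =>
      simp only [List.cons_append, pvLastAux]
      cases h : pvToken (pvRowGet x f) with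
      | none => simpa using ih
      | some t =>
          obtain ⟨s, hs⟩ := pvToken_isSome_ne_none h
          simp [hs]

-- L2: combined invariant between A's per-field distinct scan and B's per-field aggregate fold
theorem pv_agg_invariant (f : String) (rows : List (List (String × Option String)))
    (seen : PySem.Set String) (dvs : List (Option String)) (first : Option String)
    (count : Nat) (last : Option String)
    (hc : count = dvs.length)
    (hh : dvs.head? = if count = 0 then none else some first) :
    (rows.foldl (fun a row => pvStep (pvRowGet row f) a) (seen, first, count, last)).2.2.1
        = (rows.foldl (pvDistinctStep f) (seen, dvs)).2.length
    ∧ (rows.foldl (pvDistinctStep f) (seen, dvs)).2.head?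
        = (if (rows.foldl (fun a row => pvStep (pvRowGet row f) a) (seen, first, count, last)).2.2.1 = 0
           then none
           else some (rows.foldl (fun a row => pvStep (pvRowGet row f) a) (seen, first, count, last)).2.1)
    ∧ (rows.foldl (fun a row => pvStep (pvRowGet row f) a) (seen, first, count, last)).2.2.2
        = (pvLastAux f rows.reverse).or last := by
  induction rows generalizing seen dvs first count last with
  | nil => exact ⟨hc, by simpa [hc] using hh, rfl⟩
  | cons r rest ih =>
      rw [List.foldl_cons, List.foldl_cons, List.reverse_cons, pvLastAux_append]
      cases ht : pvToken (pvRowGet r f) with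
      | none =>
          rw [pvStep_tok_none _ ht, pvDistinctStep_tok_none _ ht]
          have hone : pvLastAux f [r] = none := by simp [pvLastAux, ht]
          rw [hone, Option.or_none]
          exact ih seen dvs first count last hc hh
      | some t =>
          obtain ⟨s, hs⟩ := pvToken_isSome_ne_none ht
          by_cases hmem : PySem.Set.contains seen t = true
          · rw [pvStep_tok_mem _ _ _ _ ht hmem, pvDistinctStep_tok_mem _ ht hmem]
            have := ih seen dvs first count (pvRowGet r f) hc hh
            refine ⟨this.1, this.2.1, ?_⟩
            rw [this.2.2]
            have hone : pvLastAux f [r] = pvRowGet r f := by simp [pvLastAux, ht]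
            rw [hone, hs]
            cases pvLastAux f rest.reverse <;> rfl
          · rw [pvStep_tok_new _ _ _ _ ht (by simpa using hmem),
                pvDistinctStep_tok_new _ ht (by simpa using hmem)]
            have hc' : count + 1 = (dvs ++ [pvRowGet r f]).length := by simp [hc]
            have hh' : (dvs ++ [pvRowGet r f]).head?
                = if count + 1 = 0 then none else some (if count == 0 then pvRowGet r f else first) := by
              cases dvs with
              | nil =>
                  simp at hc
                  simp [hc]
              | cons d ds =>
                  have hcne : count ≠ 0 := by simp [hc]
                  have hb : (count == 0) = false := by simpa using hcne
                  rw [List.head?_cons, if_neg hcne] at hh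
                  simpa [hb] using hh
            have := ih (PySem.Set.add seen t) (dvs ++ [pvRowGet r f])
              (if count == 0 then pvRowGet r f else first) (count + 1) (pvRowGet r f) hc' hh'
            refine ⟨this.1, this.2.1, ?_⟩
            rw [this.2.2]
            have hone : pvLastAux f [r] = pvRowGet r f := by simp [pvLastAux, ht]
            rw [hone, hs]
            cases pvLastAux f rest.reverse <;> rfl

theorem pv_agg_count (rows : List (List (String × Option String))) (f : String) :
    (pvAggFold rows f).2.2.1 = (pvDistinct rows f).length :=
  (pv_agg_invariant f rows PySem.Set.empty [] none 0 none rfl rfl).1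

theorem pv_agg_head (rows : List (List (String × Option String))) (f : String) :
    (pvDistinct rows f).head?
      = if (pvAggFold rows f).2.2.1 = 0 then none else some (pvAggFold rows f).2.1 :=
  (pv_agg_invariant f rows PySem.Set.empty [] none 0 none rfl rfl).2.1

theorem pv_agg_last (rows : List (List (String × Option String))) (f : String) :
    (pvAggFold rows f).2.2.2 = pvLastNonBlank rows f := by
  have h := (pv_agg_invariant f rows PySem.Set.empty [] none 0 none rfl rfl).2.2
  show (rows.foldl (fun a row => pvStep (pvRowGet row f) a) (PySem.Set.empty, none, 0, none)).2.2.2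
      = pvLastAux f rows.reverse
  rw [h]
  cases pvLastAux f rows.reverse <;> rfl

-- L3: the two resolution steps agree pointwise
theorem pv_resolve_eq (rows : List (List (String × Option String)))
    (st : PySem.Dict String (Option String) × List String) (f : String) :
    pvResolve st (f, pvAggFold rows f)
      = (let dvs := pvDistinct rows f
         if dvs.isEmpty then (st.1.insert f none, st.2)
         else if f == "motif" then (st.1.insert f (pvLastNonBlank rows f), st.2)
         else if pvConflictFields.contains f && decide (1 < dvs.length) then
           (st.1.insert f none, st.2 ++ [f])
         else (st.1.insert f (dvs.headD none), st.2)) := by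
  have hcount := pv_agg_count rows f
  have hhead := pv_agg_head rows f
  have hlast := pv_agg_last rows f
  rcases hagg : pvAggFold rows f with ⟨seen, first, count, last⟩
  rw [hagg] at hcount hhead hlast
  simp only at hcount hhead hlast
  by_cases h0 : count = 0
  · have he : (pvDistinct rows f).isEmpty = true := by
      have : (pvDistinct rows f).length = 0 := by omega
      simpa using this
    simp [pvResolve, h0, he]
  · obtain ⟨a, l, hd⟩ : ∃ a l, pvDistinct rows f = a :: l := by
      cases hdd : pvDistinct rows f with
      | nil => rw [hdd] at hcount; simp at hcount; exact absurd hcount h0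
      | cons a l => exact ⟨a, l, rfl⟩
    have hfa : a = first := by
      rw [hd] at hhead
      rw [if_neg h0] at hhead
      simpa using hhead
    have hb : (count == 0) = false := by simpa using h0
    rw [hd] at hcount
    simp only [pvResolve, hd, hb, Bool.false_eq_true, if_false, List.isEmpty_cons,
      List.headD_cons, ← hcount, ← hfa, ← hlast]

-- main theorem
theorem merge_supplemental_group_py_spec : Claim_equal_merge_supplemental_group_py := by
  intro rows _
  unfold Spec_merge_supplemental_group_py
  cases rows with
  | nil => rfl
  | cons r0 rest =>
      unfold merge_supplemental_group_py merge_supplemental_group_py_alt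
      simp only [pv_foldl_map, List.map_map, List.foldl_map]
      refine congrArg
        (fun res : PySem.Dict String (Option String) × List String =>
          ((some res.1.items, res.2) : (Option (List (String × Option String))) × List String)) ?_
      refine List.foldl_ext _ _ _ ?_
      intro st f _
      exact (pv_resolve_eq (r0 :: rest) st f).symm
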